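-- pv_equiv track=rewrite | github.com/Case211/remna-ad | modules/handlers/users/handlers.py | format_bulk_results
-- ===== SOURCE A (Python) =====
-- from typing import Dict, Optional, Any
--
-- def format_bulk_results(results: Dict[str, bool], operation: str) -> str:
--     """Форматирует результаты массовых операций"""
--     successful = sum(1 for success in results.values() if success)
--     total = len(results)
--
--     message = f"📊 *Результаты массовой операции: {operation}*\n\n"
--     message += f"✅ Успешно: {successful}/{total}\n"
--     message += f"❌ Ошибок: {total - successful}/{total}\n\n"
--
--     if successful < total:
--         failed_uuids = [uuid for uuid, success in results.items() if not success]
--         message += f"❌ Неудачные UUID: `{', '.join(failed_uuids[:5])}`"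
--         if len(failed_uuids) > 5:
--             message += f" и еще {len(failed_uuids) - 5}..."
--
--     return message
-- ===== SOURCE B (Python) =====
-- def format_bulk_results(results, operation):
--     """Форматирует результаты массовых операций"""
--     # single streaming pass: counters plus a buffer capped at 5 shown uuids;
--     # the full failed list is never materialised and nothing is sliced.
--     total = 0
--     failed = 0
--     shown = []
--     for uuid, success in results.items():
--         total += 1
--         if not success:
--             failed += 1
--             if len(shown) < 5:
--                 shown.append(uuid)
--
--     message = f"📊 *Результаты массовой операции: {operation}*\n\n"
--     message += f"✅ Успешно: {total - failed}/{total}\n"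
--     message += f"❌ Ошибок: {failed}/{total}\n\n"
--
--     if failed:
--         message += f"❌ Неудачные UUID: `{', '.join(shown)}`"
--         if failed > 5:
--             message += f" и еще {failed - 5}..."
--
--     return message
-- ===== Notes on version B (the rewrite author's own statement) =====
-- stated objective: alternative
-- what changed: B is a single streaming pass maintaining counters and a buffer capped at 5 shown uuids (the full failed list is never materialised and nothing is sliced), replacing A's two scans (sum over values, then a comprehension over items) followed by a [:5] slice.
import Mathlib
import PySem

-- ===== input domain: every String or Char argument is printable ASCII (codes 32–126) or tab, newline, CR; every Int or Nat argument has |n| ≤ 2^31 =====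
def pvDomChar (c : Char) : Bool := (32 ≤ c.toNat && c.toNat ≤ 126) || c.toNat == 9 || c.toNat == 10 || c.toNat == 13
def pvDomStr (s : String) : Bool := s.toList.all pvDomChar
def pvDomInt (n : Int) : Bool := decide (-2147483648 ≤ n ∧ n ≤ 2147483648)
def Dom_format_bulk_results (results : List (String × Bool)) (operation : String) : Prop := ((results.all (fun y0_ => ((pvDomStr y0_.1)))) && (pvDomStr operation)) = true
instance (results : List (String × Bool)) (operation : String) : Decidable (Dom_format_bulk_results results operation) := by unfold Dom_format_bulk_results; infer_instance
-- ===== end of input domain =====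

-- B replaces A's two scans plus [:5] slice by one streaming pass with counters and a buffer
-- capped at 5 shown uuids; objective: alternative decomposition, same O(n) cost.

-- ===== PORT A =====
def format_bulk_results (results : List (String × Bool)) (operation : String) : String :=
  -- successful = sum(1 for success in results.values() if success)
  let successful : Int := results.foldl (fun acc p => if p.2 then acc + 1 else acc) 0
  let total : Int := Int.ofNat results.length
  let message := "📊 *Результаты массовой операции: " ++ operation ++ "*\n\n"
  let message := message ++ "✅ Успешно: " ++ PySem.Int.toStr successful ++ "/" ++ PySem.Int.toStr total ++ "\n"
  let message := message ++ "❌ Ошибок: " ++ PySem.Int.toStr (total - successful) ++ "/" ++ PySem.Int.toStr total ++ "\n\n"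
  if successful < total then
    -- failed_uuids = [uuid for uuid, success in results.items() if not success]
    let failed_uuids : List String := results.foldl (fun acc p => if !p.2 then acc ++ [p.1] else acc) []
    let message := message ++ "❌ Неудачные UUID: `" ++ PySem.Str.join ", " (PySem.List.slice failed_uuids none (some 5)) ++ "`"
    if (Int.ofNat failed_uuids.length) > 5 then
      message ++ " и еще " ++ PySem.Int.toStr (Int.ofNat failed_uuids.length - 5) ++ "..."
    else message
  else message

-- ===== PORT B =====
-- loop body of Source B: total += 1; if not success: failed += 1; if len(shown) < 5: shown.append(uuid)
def pvBStep (st : Int × Int × List String) (p : String × Bool) : Int × Int × List String :=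
  let st := (st.1 + 1, st.2.1, st.2.2)
  if !p.2 then
    let st := (st.1, st.2.1 + 1, st.2.2)
    if st.2.2.length < 5 then (st.1, st.2.1, st.2.2 ++ [p.1]) else st
  else st

def format_bulk_results_alt (results : List (String × Bool)) (operation : String) : String :=
  let st := results.foldl pvBStep (0, 0, [])
  let total := st.1
  let failed := st.2.1
  let shown := st.2.2
  let message := "📊 *Результаты массовой операции: " ++ operation ++ "*\n\n"
  let message := message ++ "✅ Успешно: " ++ PySem.Int.toStr (total - failed) ++ "/" ++ PySem.Int.toStr total ++ "\n"
  let message := message ++ "❌ Ошибок: " ++ PySem.Int.toStr failed ++ "/" ++ PySem.Int.toStr total ++ "\n\n"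
  if failed ≠ 0 then
    let message := message ++ "❌ Неудачные UUID: `" ++ PySem.Str.join ", " shown ++ "`"
    if failed > 5 then
      message ++ " и еще " ++ PySem.Int.toStr (failed - 5) ++ "..."
    else message
  else message

-- ===== PRECONDITION & SPEC =====
def Spec_format_bulk_results (results : List (String × Bool)) (operation : String) (out : String) : Prop := out = format_bulk_results_alt results operation
instance (results : List (String × Bool)) (operation : String) (out : String) : Decidable (Spec_format_bulk_results results operation out) := by unfold Spec_format_bulk_results; infer_instance

-- ===== CLAIM (what is proved, stated in full; the proofs are below) =====
def Claim_equal_format_bulk_results : Prop := ∀ (results : List (String × Bool)) (operation : String), Dom_format_bulk_results results operation → Spec_format_bulk_results results operation (format_bulk_results results operation)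

-- ===== LEMMAS AND PROOFS =====

-- A's success count equals length minus the number of failures.
theorem pv_fold_succ (l : List (String × Bool)) (acc : Int) :
    l.foldl (fun acc p => if p.2 then acc + 1 else acc) acc
      = acc + Int.ofNat l.length - Int.ofNat ((l.filter (fun p => !p.2)).length) := by
  induction l generalizing acc with
  | nil => simp
  | cons h t ih =>
    cases hb : h.2 <;> simp [List.foldl, hb, ih] <;> ring

-- A's appending fold builds exactly the failed-uuid list.
theorem pv_fold_failed (l : List (String × Bool)) (acc : List String) :
    l.foldl (fun acc p => if !p.2 then acc ++ [p.1] else acc) acc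
      = acc ++ (l.filter (fun p => !p.2)).map Prod.fst := by
  induction l generalizing acc with
  | nil => simp
  | cons h t ih =>
    rw [List.foldl_cons]
    cases hb : h.2
    · rw [if_pos (by simp), ih, List.filter_cons_of_pos (by simp [hb])]
      simp
    · rw [if_neg (by simp), ih, List.filter_cons_of_neg (by simp [hb])]

-- B's streaming fold computes the length, the failure count, and the first 5 failed uuids.
theorem pv_bfold (l : List (String × Bool)) (t f : Int) (s : List String) :
    l.foldl pvBStep (t, f, s)
      = (t + Int.ofNat l.length,
         f + Int.ofNat ((l.filter (fun p => !p.2)).length),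
         s ++ ((l.filter (fun p => !p.2)).map Prod.fst).take (5 - s.length)) := by
  induction l generalizing t f s with
  | nil => simp
  | cons h t' ih =>
    rw [List.foldl_cons]
    cases hb : h.2
    · -- failure
      rw [List.filter_cons_of_pos (by simp [hb])]
      by_cases hs : s.length < 5
      · have hstep : pvBStep (t, f, s) h = (t + 1, f + 1, s ++ [h.1]) := by
          simp [pvBStep, hb, hs]
        rw [hstep, ih]
        have hlen : 5 - s.length = (5 - (s ++ [h.1]).length) + 1 := by
          simp; omega
        refine Prod.ext (by simp only [Int.ofNat_eq_natCast, List.length_cons]; all_goals (push_cast; ring)) (Prod.ext (by simp only [Int.ofNat_eq_natCast, List.length_cons]; all_goals (push_cast; ring)) ?_)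
        simp only [List.map_cons, hlen, List.take_succ_cons, List.append_assoc]
        simp
      · have hstep : pvBStep (t, f, s) h = (t + 1, f + 1, s) := by
          simp [pvBStep, hb, hs]
        rw [hstep, ih]
        have h0 : 5 - s.length = 0 := by omega
        refine Prod.ext (by simp only [Int.ofNat_eq_natCast, List.length_cons]; all_goals (push_cast; ring)) (Prod.ext (by simp only [Int.ofNat_eq_natCast, List.length_cons]; all_goals (push_cast; ring)) ?_)
        simp [h0]
    · -- success
      rw [List.filter_cons_of_neg (by simp [hb])]
      have hstep : pvBStep (t, f, s) h = (t + 1, f, s) := by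
        simp [pvBStep, hb]
      rw [hstep, ih]
      refine Prod.ext (by simp only [Int.ofNat_eq_natCast, List.length_cons]; push_cast; ring) (Prod.ext (by simp only [Int.ofNat_eq_natCast]) rfl)

-- ===== VERDICT (by name: the statement is the Claim_ definition above) =====
theorem format_bulk_results_spec : Claim_equal_format_bulk_results := by
  intro results operation _
  unfold Spec_format_bulk_results format_bulk_results format_bulk_results_alt
  rw [pv_fold_succ, pv_fold_failed, pv_bfold]
  simp only [List.nil_append, zero_add, Int.ofNat_eq_natCast, List.length_map, List.length_nil,
    Nat.sub_zero]
  have hk : ((results.length : Int)) - (((results.length : Int))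
        - (((results.filter (fun p => !p.2)).length : Nat) : Int))
      = (((results.filter (fun p => !p.2)).length : Nat) : Int) := by omega
  rw [hk]
  have hle : (results.filter (fun p => !p.2)).length ≤ results.length :=
    List.length_filter_le _ _
  by_cases h : (results.filter (fun p => !p.2)).length = 0
  · have hA : ¬ ((results.length : Int) - ((results.filter (fun p => !p.2)).length : Int)
        < (results.length : Int)) := by omega
    have hB : ¬ (((results.filter (fun p => !p.2)).length : Nat) : Int) ≠ 0 := by
      omega
    rw [if_neg hA, if_neg hB]
  · have hA : ((results.length : Int) - ((results.filter (fun p => !p.2)).length : Int)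
        < (results.length : Int)) := by omega
    have hB : (((results.filter (fun p => !p.2)).length : Nat) : Int) ≠ 0 := by
      omega
    rw [if_pos hA, if_pos hB, PySem.List.slice_to _ (by norm_num : (0:Int) ≤ 5)]
    simp only [show Int.toNat 5 = 5 from rfl]
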